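-- pv_equiv track=rewrite | github.com/rpgunasekara/CMSC201 | homeworks/hw6/starfish.py | starfish
-- ===== SOURCE A (Python) =====
-- def starfish(leg_list, generations):
--     # Base case, sends the leg_list after iterations to count_starfish.
--     if generations == 0:
--         return leg_list
--
--     # List to hold updated values.
--     temp_leg_list = []
--
--     for i in range(len(leg_list)):
--         if leg_list[i] == 5:
--             temp_leg_list.append(1)
--             temp_leg_list.append(1)
--             temp_leg_list.append(1)
--             temp_leg_list.append(1)
--             temp_leg_list.append(1)
--         else:
--             temp_leg_list.append(leg_list[i] + 1)
--
--     # Calls starfish() with new leg_list.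
--     return starfish(temp_leg_list, generations - 1)
-- ===== SOURCE B (Python) =====
-- def _evolve(leg, generations):
--     # Closed form for the fate of one leg after `generations` steps:
--     # a leg > 5 (or one that never reaches 5 in time) just grows by one per step;
--     # a leg that reaches 5 explodes into five 1-legs, and that quinary burst
--     # repeats every 5 further steps, so the descendants are 5 * 5**q identical legs.
--     if leg <= 5 and generations > 5 - leg:
--         after = generations - (5 - leg) - 1
--         q, r = divmod(after, 5)
--         return [1 + r] * (5 * 5 ** q)
--     return [leg + generations]
--
--
-- def starfish(leg_list, generations):
--     return [v for leg in leg_list for v in _evolve(leg, generations)]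
-- ===== Notes on version B (the rewrite author's own statement) =====
-- stated objective: alternative
-- what changed: Replaced the per-generation rebuild recursion by a per-leg closed form: each leg independently either grows by `generations`, or (once it hits 5) yields a block of 5*5**q identical descendant legs computed with one divmod and a list repetition, and B concatenates these blocks in one pass over the input; cost is dominated by the output size for both.
import Mathlib
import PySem

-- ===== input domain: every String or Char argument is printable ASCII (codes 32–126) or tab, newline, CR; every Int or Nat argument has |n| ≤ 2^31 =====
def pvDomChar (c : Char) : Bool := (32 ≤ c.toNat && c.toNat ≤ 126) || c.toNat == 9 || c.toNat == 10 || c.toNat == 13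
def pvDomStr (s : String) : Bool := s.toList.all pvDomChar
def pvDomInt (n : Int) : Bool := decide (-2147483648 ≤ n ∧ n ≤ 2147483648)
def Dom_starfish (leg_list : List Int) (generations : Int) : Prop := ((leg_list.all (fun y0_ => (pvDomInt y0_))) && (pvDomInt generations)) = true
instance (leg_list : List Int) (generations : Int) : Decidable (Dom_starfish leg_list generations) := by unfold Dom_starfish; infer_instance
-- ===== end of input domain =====

-- B replaces A's generation-by-generation rebuild with a per-leg closed form (a leg either just
-- grows, or explodes into a block of 5*5^q identical legs), concatenated over the input (objective: alternative; cost is output-dominated for both).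
-- Pre_ excludes negative generations, on which Python A raises RecursionError (and exceeds any depth).


-- ===== PORT A =====
-- recursion as in A; for generations < 0 Python recurses forever (RecursionError, outside Pre_),
-- here a totality guard returns leg_list there
def starfish (leg_list : List Int) (generations : Int) : List Int :=
  if generations = 0 then leg_list
  else if generations < 0 then leg_list
  else
    starfish
      (leg_list.foldl
        (fun temp_leg_list leg =>
          if leg = 5 then ((((temp_leg_list ++ [1]) ++ [1]) ++ [1]) ++ [1]) ++ [1]
          else temp_leg_list ++ [leg + 1]) [])
      (generations - 1)
termination_by generations.toNat
decreasing_by omega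

-- ===== PORT B =====
-- Source B's _evolve: closed form for one leg; inside the branch `after ≥ 0`, so Python's
-- `[x] * (5 * 5**q)` is exactly List.replicate (5 * 5 ^ q.toNat) x
def pvEvolve (leg : Int) (generations : Int) : List Int :=
  if leg ≤ 5 ∧ 5 - leg < generations then
    -- after := generations - (5 - leg) - 1 ; q, r := divmod(after, 5)   (after ≥ 0 here)
    List.replicate
      (5 * 5 ^ (PySem.Int.floordiv (generations - (5 - leg) - 1) 5).toNat)
      (1 + PySem.Int.mod (generations - (5 - leg) - 1) 5)
  else [leg + generations]

def starfish_alt (leg_list : List Int) (generations : Int) : List Int :=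
  leg_list.flatMap (fun leg => pvEvolve leg generations)

-- ===== PRECONDITION & SPEC =====
-- Pre_ excludes generations < 0 (unbounded recursion: Python A raises RecursionError), generations > 1000
-- (A's recursion depth equals generations, beyond the interpreter's default recursion limit), and inputs
-- whose result explodes past ~10^7 elements per leg (a leg ≤ 5 with more than 5 - leg + 46 generations),
-- on which both Pythons exhaust memory (MemoryError); the bounds may also drop some returning borderline inputs.
def Pre_starfish (leg_list : List Int) (generations : Int) : Prop :=
  0 ≤ generations ∧ generations ≤ 1000 ∧
    ∀ leg ∈ leg_list, 5 < leg ∨ generations ≤ 5 - leg + 46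
instance (leg_list : List Int) (generations : Int) : Decidable (Pre_starfish leg_list generations) := by unfold Pre_starfish; infer_instance
def pvWitness_starfish : List Int × Int := ([1, 5, 4], 2)

def Spec_starfish (leg_list : List Int) (generations : Int) (out : List Int) : Prop := out = starfish_alt leg_list generations
instance (leg_list : List Int) (generations : Int) (out : List Int) : Decidable (Spec_starfish leg_list generations out) := by unfold Spec_starfish; infer_instance

-- ===== CLAIM (what is proved, stated in full; the proofs are below) =====
def Claim_equal_starfish : Prop := ∀ (leg_list : List Int) (generations : Int), Dom_starfish leg_list generations → Pre_starfish leg_list generations → Spec_starfish leg_list generations (starfish leg_list generations)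

-- ===== LEMMAS AND PROOFS =====

-- one generation of A: the append loop builds the concatenation of per-leg blocks
theorem starfish_step (l : List Int) (acc : List Int) :
    l.foldl
      (fun temp_leg_list leg =>
        if leg = 5 then ((((temp_leg_list ++ [1]) ++ [1]) ++ [1]) ++ [1]) ++ [1]
        else temp_leg_list ++ [leg + 1]) acc
    = acc ++ l.flatMap (fun leg => if leg = 5 then [1, 1, 1, 1, 1] else [leg + 1]) := by
  induction l generalizing acc with
  | nil => simp
  | cons x xs ih =>
    simp only [List.foldl_cons, List.flatMap_cons, ih]
    split_ifs <;> simp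

theorem replicate_five {α : Type} (n : Nat) (x : α) :
    List.replicate (5 * n) x
      = List.replicate n x ++ (List.replicate n x ++ (List.replicate n x ++
          (List.replicate n x ++ List.replicate n x))) := by
  rw [show 5 * n = n + (n + (n + (n + n))) from by ring,
    List.replicate_add, List.replicate_add, List.replicate_add, List.replicate_add]

-- the closed form commutes with one step of the evolution
theorem evolve_step (v g : Int) (hg : 0 < g) :
    pvEvolve v g
      = (if v = 5 then [1, 1, 1, 1, 1] else [v + 1]).flatMap (fun w => pvEvolve w (g - 1)) := by
  by_cases h5 : v = 5
  · subst h5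
    rw [if_pos rfl]
    by_cases hsmall : g - 1 ≤ 4
    · -- no further explosion: after = g-1 ∈ [0,4], q = 0, r = g-1
      have hq : PySem.Int.floordiv (g - (5 - 5) - 1) 5 = 0 := by
        rw [PySem.Int.floordiv_eq_ediv_of_pos (by omega)]; omega
      have hr : PySem.Int.mod (g - (5 - 5) - 1) 5 = g - 1 := by
        rw [PySem.Int.mod_eq_emod_of_pos (by omega)]; omega
      have h1 : pvEvolve (1 : Int) (g - 1) = [1 + (g - 1)] := by
        rw [pvEvolve, if_neg (by omega)]
      rw [pvEvolve, if_pos (by omega), hq, hr]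
      simp [h1, List.replicate_succ]
    · -- after = g-1 ≥ 5 : one more full quinary period
      have hq' : 0 ≤ PySem.Int.floordiv (g - 1 - (5 - 1) - 1) 5 := by
        rw [PySem.Int.floordiv_eq_ediv_of_pos (by omega)]; omega
      have hq : PySem.Int.floordiv (g - (5 - 5) - 1) 5
          = PySem.Int.floordiv (g - 1 - (5 - 1) - 1) 5 + 1 := by
        rw [PySem.Int.floordiv_eq_ediv_of_pos (by omega),
            PySem.Int.floordiv_eq_ediv_of_pos (by omega)]; omega
      have hr : PySem.Int.mod (g - (5 - 5) - 1) 5 = PySem.Int.mod (g - 1 - (5 - 1) - 1) 5 := by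
        rw [PySem.Int.mod_eq_emod_of_pos (by omega), PySem.Int.mod_eq_emod_of_pos (by omega)]
        omega
      have h1 : pvEvolve (1 : Int) (g - 1)
          = List.replicate (5 * 5 ^ (PySem.Int.floordiv (g - 1 - (5 - 1) - 1) 5).toNat)
              (1 + PySem.Int.mod (g - 1 - (5 - 1) - 1) 5) := by
        rw [pvEvolve, if_pos (by omega)]
      rw [pvEvolve, if_pos (by omega), hq, hr]
      have htn : (PySem.Int.floordiv (g - 1 - (5 - 1) - 1) 5 + 1).toNat
          = (PySem.Int.floordiv (g - 1 - (5 - 1) - 1) 5).toNat + 1 := by omega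
      rw [htn, pow_succ', replicate_five]
      simp only [h1, List.flatMap_cons, List.flatMap_nil, List.append_nil]
  · simp only [if_neg h5, List.flatMap_cons, List.flatMap_nil, List.append_nil]
    by_cases hle : v ≤ 5
    · have hv4 : v ≤ 4 := by omega
      by_cases hbig : 5 - v < g
      · -- both sides explode with the same `after`
        rw [pvEvolve, if_pos ⟨hle, hbig⟩, pvEvolve, if_pos (by constructor <;> omega)]
        have : g - (5 - v) - 1 = g - 1 - (5 - (v + 1)) - 1 := by omega
        rw [this]
      · rw [pvEvolve, if_neg (by omega), pvEvolve, if_neg (by omega)]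
        norm_num
    · -- v ≥ 6: never reaches 5
      rw [pvEvolve, if_neg (by omega), pvEvolve, if_neg (by omega)]
      norm_num

-- A's one step followed by B's closed form at g-1 is B's closed form at g
theorem flatmap_level (l : List Int) (g : Int) (hg : 0 < g) :
    starfish_alt (l.flatMap (fun leg => if leg = 5 then [1, 1, 1, 1, 1] else [leg + 1])) (g - 1)
      = starfish_alt l g := by
  induction l with
  | nil => rfl
  | cons x xs ih =>
    simp only [starfish_alt, List.flatMap_cons, List.flatMap_append] at ih ⊢
    rw [ih, evolve_step x g hg]

theorem starfish_eq (l : List Int) (g : Int) (hg : 0 ≤ g) : starfish l g = starfish_alt l g := by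
  generalize hn : g.toNat = n
  induction n generalizing l g with
  | zero =>
    rw [starfish]
    have hg0 : g = 0 := by omega
    subst hg0
    simp only [if_pos rfl, starfish_alt]
    have : ∀ v : Int, pvEvolve v 0 = [v] := by
      intro v; rw [pvEvolve, if_neg (by omega)]; norm_num
    simp [this]
  | succ n ih =>
    rw [starfish]
    rw [if_neg (by omega), if_neg (by omega), starfish_step]
    rw [List.nil_append, ih _ (g - 1) (by omega) (by omega)]
    exact flatmap_level l g (by omega)

-- ===== VERDICT (by name: the statement is the Claim_ definition above) =====
theorem starfish_spec : Claim_equal_starfish := by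
  intro l g _ hpre
  unfold Spec_starfish
  exact starfish_eq l g hpre.1
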